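-- pv_equiv track=rewrite | github.com/amar512-prog/pif-research-platform | src/pif_research_platform/topic_intelligence.py | _generic_indicator_label
-- ===== SOURCE A (Python) =====
-- def _generic_indicator_label(bucket: str) -> str:
--     bucket_title = bucket.title()
--     if any(token in bucket.lower() for token in ("risk", "pressure", "exposure", "emission")):
--         return f"{bucket_title} pressure signal"
--     if "delivery" in bucket.lower():
--         return f"{bucket_title} performance signal"
--     if "finance" in bucket.lower():
--         return f"{bucket_title} conditions signal"
--     return f"{bucket_title} trend signal"
-- ===== SOURCE B (Python) =====
-- # Flat token->priority map; the label is chosen by the MINIMUM priority among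
-- # all matching tokens (3 = no match), not by an ordered branch chain.
-- _TOKEN_PRIORITY = {
--     "risk": 0, "pressure": 0, "exposure": 0, "emission": 0,
--     "delivery": 1, "finance": 2,
-- }
-- _SUFFIX = ["pressure", "performance", "conditions", "trend"]
--
-- def _generic_indicator_label(bucket: str) -> str:
--     low = bucket.lower()
--     best = min((p for t, p in _TOKEN_PRIORITY.items() if t in low), default=3)
--     return f"{bucket.title()} {_SUFFIX[best]} signal"
-- ===== Notes on version B (the rewrite author's own statement) =====
-- stated objective: alternative
-- what changed: Replaces the ordered if-chain with an unordered aggregation: every keyword carries a numeric priority, B computes the minimum priority over all matching keywords in one pass and indexes a suffix table, so no branch ordering or early return remains.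
import Mathlib
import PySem

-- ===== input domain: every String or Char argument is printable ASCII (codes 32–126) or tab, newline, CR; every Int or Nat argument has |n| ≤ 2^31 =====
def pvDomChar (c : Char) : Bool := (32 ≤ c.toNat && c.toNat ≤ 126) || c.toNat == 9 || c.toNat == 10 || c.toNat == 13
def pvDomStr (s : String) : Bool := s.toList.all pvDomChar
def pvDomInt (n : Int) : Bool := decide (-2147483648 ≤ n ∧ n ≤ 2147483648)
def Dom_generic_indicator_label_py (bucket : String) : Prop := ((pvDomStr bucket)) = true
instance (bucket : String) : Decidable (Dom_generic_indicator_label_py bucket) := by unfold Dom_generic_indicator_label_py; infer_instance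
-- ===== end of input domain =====

-- B replaces A's ordered if-chain by a min-priority aggregation over a flat
-- keyword->priority table plus a suffix table (objective: alternative).

-- shared helper: port of Python str.title(), exact on the ASCII domain Dom admits
def pyTitleGo : List Char → Bool → List Char
  | [], _ => []
  | c :: rest, prevAlpha =>
    if c.isAlpha then
      (if prevAlpha then c.toLower else c.toUpper) :: pyTitleGo rest true
    else
      c :: pyTitleGo rest false

def pyTitle (s : String) : String := String.ofList (pyTitleGo s.toList false)

-- ===== PORT A =====
def generic_indicator_label_py (bucket : String) : String :=
  let bucket_title := pyTitle bucket
  if ["risk", "pressure", "exposure", "emission"].any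
      (fun token => PySem.Str.isIn token (PySem.Str.lower bucket)) then
    bucket_title ++ " pressure signal"
  else if PySem.Str.isIn "delivery" (PySem.Str.lower bucket) then
    bucket_title ++ " performance signal"
  else if PySem.Str.isIn "finance" (PySem.Str.lower bucket) then
    bucket_title ++ " conditions signal"
  else
    bucket_title ++ " trend signal"

-- ===== PORT B =====
def pvTokenPriority : List (String × Nat) :=
  [("risk", 0), ("pressure", 0), ("exposure", 0), ("emission", 0),
   ("delivery", 1), ("finance", 2)]

def pvSuffix : List String := ["pressure", "performance", "conditions", "trend"]

-- min((p for t, p in _TOKEN_PRIORITY.items() if t in low), default=3)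
def pvBest (low : String) : Nat :=
  pvTokenPriority.foldl
    (fun acc tp => if PySem.Str.isIn tp.1 low then min acc tp.2 else acc) 3

def generic_indicator_label_py_alt (bucket : String) : String :=
  let low := PySem.Str.lower bucket
  pyTitle bucket ++ " " ++ pvSuffix.getD (pvBest low) "" ++ " signal"

-- ===== PRECONDITION & SPEC =====
def Spec_generic_indicator_label_py (bucket : String) (out : String) : Prop := out = generic_indicator_label_py_alt bucket
instance (bucket : String) (out : String) : Decidable (Spec_generic_indicator_label_py bucket out) := by unfold Spec_generic_indicator_label_py; infer_instance

-- ===== CLAIM (what is proved, stated in full; the proofs are below) =====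
def Claim_equal_generic_indicator_label_py : Prop := ∀ (bucket : String), Dom_generic_indicator_label_py bucket → Spec_generic_indicator_label_py bucket (generic_indicator_label_py bucket)

-- ===== LEMMAS AND PROOFS =====

-- ===== VERDICT (by name: the statement is the Claim_ definition above) =====
theorem generic_indicator_label_py_spec : Claim_equal_generic_indicator_label_py := by
  intro bucket _
  unfold Spec_generic_indicator_label_py
  simp only [generic_indicator_label_py, generic_indicator_label_py_alt,
    pvTokenPriority, pvBest, pvSuffix, List.foldl, List.any_cons, List.any_nil,
    Bool.or_false]
  cases h1 : PySem.Str.isIn "risk" (PySem.Str.lower bucket) <;>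
  cases h2 : PySem.Str.isIn "pressure" (PySem.Str.lower bucket) <;>
  cases h3 : PySem.Str.isIn "exposure" (PySem.Str.lower bucket) <;>
  cases h4 : PySem.Str.isIn "emission" (PySem.Str.lower bucket) <;>
  cases h5 : PySem.Str.isIn "delivery" (PySem.Str.lower bucket) <;>
  cases h6 : PySem.Str.isIn "finance" (PySem.Str.lower bucket) <;>
    simp [List.getD, String.append_assoc]
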